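-- pv_equiv track=rewrite | github.com/trenBarrow/self-play-posttraining-demo | tools/shared/schema.py | _primary_transaction_packet
-- ===== SOURCE A (Python) =====
-- from typing import Any, Iterable
--
-- def _packet_family_and_stage(packet_kind: str) -> tuple[str, str | None]:
--     normalized = packet_kind.strip().lower()
--     if normalized == "telemetry":
--         return "telemetry", "telemetry"
--     if normalized == "request":
--         return "request", "request"
--     if normalized == "uplink":
--         return "request", "forwarded_request"
--     if normalized == "sat_response":
--         return "response", "intermediate_response"
--     if normalized == "final":
--         return "response", "terminal_response"
--     if normalized == "event":
--         return "event", "event"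
--     return "other", normalized or None
--
-- def _primary_transaction_packet(related_packets: list[dict[str, Any]]) -> dict[str, Any] | None:
--     for packet in related_packets:
--         if str(packet.get("packet_kind", "")).strip().lower() == "request":
--             return packet
--     for packet in related_packets:
--         if _packet_family_and_stage(str(packet.get("packet_kind", "")))[0] == "request":
--             return packet
--     return related_packets[0] if related_packets else None
-- ===== SOURCE B (Python) =====
-- from typing import Any
--
-- def _primary_transaction_packet(related_packets: list) -> dict | None:
--     candidate = None
--     for packet in related_packets:
--         normalized = str(packet.get("packet_kind", "")).strip().lower()
--         if normalized == "request":
--             return packet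
--         if candidate is None and normalized == "uplink":
--             candidate = packet
--     if candidate is not None:
--         return candidate
--     return related_packets[0] if related_packets else None
-- ===== Notes on version B (the rewrite author's own statement) =====
-- stated objective: simpler
-- what changed: Replaces A's two sequential scans (exact 'request', then family-'request' via the helper) with one single pass that returns immediately on an exact 'request' and records the first 'uplink' packet as a fallback candidate, dropping the helper entirely.
import Mathlib
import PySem

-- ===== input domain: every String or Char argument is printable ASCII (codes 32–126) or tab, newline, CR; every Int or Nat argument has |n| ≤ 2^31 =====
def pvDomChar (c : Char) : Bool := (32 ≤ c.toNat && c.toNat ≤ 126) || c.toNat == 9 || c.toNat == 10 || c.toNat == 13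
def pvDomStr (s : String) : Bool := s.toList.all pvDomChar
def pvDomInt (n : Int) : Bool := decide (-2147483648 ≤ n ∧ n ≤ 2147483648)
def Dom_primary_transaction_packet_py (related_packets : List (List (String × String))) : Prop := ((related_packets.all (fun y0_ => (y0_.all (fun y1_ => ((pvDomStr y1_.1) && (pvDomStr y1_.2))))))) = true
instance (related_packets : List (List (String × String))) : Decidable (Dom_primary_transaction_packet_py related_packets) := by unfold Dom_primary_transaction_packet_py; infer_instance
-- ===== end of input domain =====

-- B replaces A's two sequential scans by a single pass with a fallback candidate (objective: simpler).

-- ===== PORT A =====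
-- packet.get("packet_kind", "") on an association list (first match, default "")
def pvGetKind (packet : List (String × String)) : String :=
  match packet.find? (fun kv => kv.1 == "packet_kind") with
  | some kv => kv.2
  | none => ""

-- literal port of _packet_family_and_stage
def packet_family_and_stage (packet_kind : String) : String × Option String :=
  let normalized := PySem.Str.lower (PySem.Str.strip packet_kind)
  if normalized == "telemetry" then ("telemetry", some "telemetry")
  else if normalized == "request" then ("request", some "request")
  else if normalized == "uplink" then ("request", some "forwarded_request")
  else if normalized == "sat_response" then ("response", some "intermediate_response")
  else if normalized == "final" then ("response", some "terminal_response")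
  else if normalized == "event" then ("event", some "event")
  else ("other", if normalized == "" then none else some normalized)

-- A's first loop: first packet whose normalized kind is exactly "request"
def pvScan1 : List (List (String × String)) → Option (List (String × String))
  | [] => none
  | p :: rest =>
    if PySem.Str.lower (PySem.Str.strip (pvGetKind p)) == "request" then some p
    else pvScan1 rest

-- A's second loop: first packet whose family is "request"
def pvScan2 : List (List (String × String)) → Option (List (String × String))
  | [] => none
  | p :: rest =>
    if (packet_family_and_stage (pvGetKind p)).1 == "request" then some p
    else pvScan2 rest

def primary_transaction_packet_py (related_packets : List (List (String × String))) : Option (List (String × String)) :=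
  match pvScan1 related_packets with
  | some p => some p
  | none =>
    match pvScan2 related_packets with
    | some p => some p
    | none => related_packets.head?

-- ===== PORT B =====
-- single pass: return on exact "request", remember the first "uplink" as fallback candidate
def pvLoopB : List (List (String × String)) → Option (List (String × String)) → Option (List (String × String))
  | [], cand => cand
  | p :: rest, cand =>
    let normalized := PySem.Str.lower (PySem.Str.strip (pvGetKind p))
    if normalized == "request" then some p
    else pvLoopB rest (if cand.isNone && normalized == "uplink" then some p else cand)

def primary_transaction_packet_py_alt (related_packets : List (List (String × String))) : Option (List (String × String)) :=
  match pvLoopB related_packets none with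
  | some p => some p
  | none => related_packets.head?

-- ===== PRECONDITION & SPEC =====
def Spec_primary_transaction_packet_py (related_packets : List (List (String × String))) (out : Option (List (String × String))) : Prop := out = primary_transaction_packet_py_alt related_packets
instance (related_packets : List (List (String × String))) (out : Option (List (String × String))) : Decidable (Spec_primary_transaction_packet_py related_packets out) := by unfold Spec_primary_transaction_packet_py; infer_instance

-- ===== CLAIM (what is proved, stated in full; the proofs are below) =====
def Claim_equal_primary_transaction_packet_py : Prop := ∀ (related_packets : List (List (String × String))), Dom_primary_transaction_packet_py related_packets → Spec_primary_transaction_packet_py related_packets (primary_transaction_packet_py related_packets)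

-- ===== LEMMAS AND PROOFS =====

-- family is "request" iff normalized is "request" or "uplink"
lemma family_request_iff (s : String) :
    ((packet_family_and_stage s).1 == "request") =
      ((PySem.Str.lower (PySem.Str.strip s) == "request")
        || (PySem.Str.lower (PySem.Str.strip s) == "uplink")) := by
  by_cases h2 : PySem.Str.lower (PySem.Str.strip s) = "request"
  · simp [packet_family_and_stage, h2]
  · by_cases h3 : PySem.Str.lower (PySem.Str.strip s) = "uplink"
    · simp [packet_family_and_stage, h3]
    · simp only [packet_family_and_stage, beq_iff_eq, h2, h3]
      split_ifs <;> simp_all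

-- if A's first scan finds a packet, B's loop returns it regardless of the candidate
lemma loopB_scan1_some (rp : List (List (String × String))) (cand : Option (List (String × String))) (p : List (String × String))
    (h : pvScan1 rp = some p) : pvLoopB rp cand = some p := by
  induction rp generalizing cand with
  | nil => simp [pvScan1] at h
  | cons q rest ih =>
    simp only [pvScan1, pvLoopB] at *
    split_ifs at h ⊢ with hq hc
    · exact h
    · exact ih _ h
    · exact ih _ h

-- if no exact "request" exists, B's loop returns the candidate if set, else A's second scan
lemma loopB_scan1_none (rp : List (List (String × String))) (cand : Option (List (String × String)))
    (h : pvScan1 rp = none) :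
    pvLoopB rp cand = cand.or (pvScan2 rp) := by
  induction rp generalizing cand with
  | nil => simp [pvLoopB, pvScan2]
  | cons q rest ih =>
    by_cases hq : (PySem.Str.lower (PySem.Str.strip (pvGetKind q)) == "request") = true
    · simp [pvScan1, hq] at h
    · have h' : pvScan1 rest = none := by simpa [pvScan1, hq] using h
      have hq' : (PySem.Str.lower (PySem.Str.strip (pvGetKind q)) == "request") = false := by
        simpa using hq
      rw [show pvLoopB (q :: rest) cand
            = pvLoopB rest (if (cand.isNone && (PySem.Str.lower (PySem.Str.strip (pvGetKind q)) == "uplink")) = true then some q else cand) from by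
          simp [pvLoopB, hq']]
      rw [ih _ h']
      rw [show pvScan2 (q :: rest)
            = if (PySem.Str.lower (PySem.Str.strip (pvGetKind q)) == "uplink") = true then some q else pvScan2 rest from by
          simp [pvScan2, family_request_iff, hq']]
      by_cases hu : (PySem.Str.lower (PySem.Str.strip (pvGetKind q)) == "uplink") = true
      · cases cand <;> simp [hu]
      · have hu' : (PySem.Str.lower (PySem.Str.strip (pvGetKind q)) == "uplink") = false := by
          simpa using hu
        simp [hu']

theorem primary_transaction_packet_py_eq (rp : List (List (String × String))) :
    primary_transaction_packet_py rp = primary_transaction_packet_py_alt rp := by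
  unfold primary_transaction_packet_py primary_transaction_packet_py_alt
  cases h1 : pvScan1 rp with
  | some p => rw [loopB_scan1_some rp none p h1]
  | none =>
    rw [loopB_scan1_none rp none h1]
    simp only [Option.none_or]

-- ===== VERDICT (by name: the statement is the Claim_ definition above) =====
theorem primary_transaction_packet_py_spec : Claim_equal_primary_transaction_packet_py := by
  intro rp _
  unfold Spec_primary_transaction_packet_py
  exact primary_transaction_packet_py_eq rp
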